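-- pv_equiv track=rewrite | github.com/Saifa36622/fibo-python | another_f.py | f
-- ===== SOURCE A (Python) =====
-- def f(n):
--   x = 2
--   y = ""
--   y2 = ""
--   for i in range(n):
--     y += str(x)
--     x += 2
--     y2 = y + y2
--   return y2
-- ===== SOURCE B (Python) =====
-- def f(n):
--   res = ""
--   for i in range(n, 0, -1):
--     for j in range(1, i + 1):
--       res += str(2 * j)
--   return res
-- ===== Notes on version B (the rewrite author's own statement) =====
-- stated objective: alternative
-- what changed: Instead of maintaining a growing prefix string y and prepending it to the accumulator on every iteration, B rebuilds each prefix segment from scratch with nested loops (outer index descending, inner ascending) and only ever appends to the result.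
import Mathlib
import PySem

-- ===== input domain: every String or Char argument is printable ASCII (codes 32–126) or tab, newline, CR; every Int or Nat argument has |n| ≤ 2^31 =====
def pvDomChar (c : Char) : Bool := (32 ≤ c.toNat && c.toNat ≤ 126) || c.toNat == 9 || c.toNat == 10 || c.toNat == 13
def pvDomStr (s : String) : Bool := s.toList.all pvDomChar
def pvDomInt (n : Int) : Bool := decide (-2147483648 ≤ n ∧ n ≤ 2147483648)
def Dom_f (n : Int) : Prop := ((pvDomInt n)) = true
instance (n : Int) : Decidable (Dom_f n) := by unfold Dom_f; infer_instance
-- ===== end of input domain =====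

-- B drops A's running prefix/prepend accumulator and rebuilds each segment from scratch with nested appends (alternative decomposition, same result).

-- ===== PORT A =====
def f (n : Int) : String :=
  let st := (PySem.List.pyRange 0 n 1).foldl
    (fun (st : Int × String × String) _ =>
      let y := st.2.1 ++ PySem.Int.toStr st.1
      (st.1 + 2, y, y ++ st.2.2))
    (2, "", "")
  st.2.2

-- ===== PORT B =====
def f_alt (n : Int) : String :=
  (PySem.List.pyRange n 0 (-1)).foldl
    (fun res i =>
      (PySem.List.pyRange 1 (i + 1) 1).foldl
        (fun r j => r ++ PySem.Int.toStr (2 * j)) res)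
    ""

-- ===== PRECONDITION & SPEC =====
def Spec_f (n : Int) (out : String) : Prop := out = f_alt n
instance (n : Int) (out : String) : Decidable (Spec_f n out) := by unfold Spec_f; infer_instance

-- ===== CLAIM (what is proved, stated in full; the proofs are below) =====
def Claim_equal_f : Prop := ∀ (n : Int), Dom_f n → Spec_f n (f n)

-- ===== LEMMAS AND PROOFS =====

-- segS k = "24…(2k)": the segment both programs build for one prefix
def segS : Nat → String
  | 0 => ""
  | k + 1 => segS k ++ PySem.Int.toStr (2 * ((k : Int) + 1))

-- bigS k = segS k ++ segS (k-1) ++ … ++ segS 1: the common result for n = k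
def bigS : Nat → String
  | 0 => ""
  | k + 1 => segS (k + 1) ++ bigS k

theorem fA_closed (k : Nat) :
    (PySem.List.pyRange 0 (k : Int) 1).foldl
      (fun (st : Int × String × String) _ =>
        let y := st.2.1 ++ PySem.Int.toStr st.1
        (st.1 + 2, y, y ++ st.2.2))
      (2, "", "") = (2 + 2 * (k : Int), segS k, bigS k) := by
  induction k with
  | zero => simp [PySem.List.pyRange_one_eq_nil, segS, bigS]
  | succ k ih =>
      have h : ((k : Int) + 1) = ((k + 1 : Nat) : Int) := by push_cast; ring
      rw [← h, PySem.List.pyRange_one_succ_right (by positivity), List.foldl_append, ih]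
      have harg : (2 : Int) + 2 * (k : Int) = 2 * ((k : Int) + 1) := by ring
      simp only [List.foldl_cons, List.foldl_nil, harg, segS, bigS]
      simp only [Prod.mk.injEq]
      exact ⟨by ring, trivial⟩

theorem fB_inner (k : Nat) (acc : String) :
    (PySem.List.pyRange 1 ((k : Int) + 1) 1).foldl
      (fun r j => r ++ PySem.Int.toStr (2 * j)) acc = acc ++ segS k := by
  induction k generalizing acc with
  | zero => simp [PySem.List.pyRange_one_eq_nil, segS]
  | succ k ih =>
      have h : ((k + 1 : Nat) : Int) + 1 = ((k : Int) + 1) + 1 := by push_cast; ring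
      rw [h, PySem.List.pyRange_one_succ_right (by omega), List.foldl_append]
      rw [ih]
      simp [segS, String.append_assoc]

theorem fB_outer (m : Nat) (acc : String) :
    (PySem.List.pyRange (m : Int) 0 (-1)).foldl
      (fun res i =>
        (PySem.List.pyRange 1 (i + 1) 1).foldl
          (fun r j => r ++ PySem.Int.toStr (2 * j)) res)
      acc = acc ++ bigS m := by
  induction m generalizing acc with
  | zero => simp [PySem.List.pyRange_neg_one_eq_nil, bigS]
  | succ m ih =>
      rw [show ((m + 1 : Nat) : Int) = (m : Int) + 1 by push_cast; ring,
        PySem.List.pyRange_neg_one_cons (by omega), List.foldl_cons]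
      have hsub : (m : Int) + 1 - 1 = (m : Int) := by ring
      rw [hsub, show ((m : Int) + 1 + 1) = ((m + 1 : Nat) : Int) + 1 by push_cast; ring,
        fB_inner (m + 1) acc, ih]
      simp [bigS, String.append_assoc]

-- ===== VERDICT (by name: the statement is the Claim_ definition above) =====
theorem f_spec : Claim_equal_f := by
  intro n _
  unfold Spec_f f f_alt
  rcases le_or_gt n 0 with hn | hn
  · rw [PySem.List.pyRange_one_eq_nil hn, PySem.List.pyRange_neg_one_eq_nil hn]
    rfl
  · obtain ⟨k, rfl⟩ : ∃ k : Nat, n = (k : Int) := ⟨n.toNat, (Int.toNat_of_nonneg hn.le).symm⟩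
    rw [fA_closed k, fB_outer k ""]
    simp
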